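-- pv_equiv track=rewrite | github.com/Junaien/open_course_lab | crytography/qc_381/ps1/ps1_4.py | withOrder
-- ===== SOURCE A (Python) =====
-- def withOrder(n, m):
--   rt = []
--   for i in range(m):
--     cur = 1
--     for j in range(n - 1):
--       cur = (cur * i) % m
--       if cur == 1:
--         cur = 0
--         break
--
--     if (cur * i) % m == 1:
--       rt.append(i)
--   return rt
-- ===== SOURCE B (Python) =====
-- def withOrder(n, m):
--     if m <= 0:
--         return []
--     # A's inner loop is empty for every n <= 1, so any such n behaves like n == 1.
--     nn = n if n > 1 else 1
--     divs = [d for d in range(1, nn) if nn % d == 0]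
--     return [i for i in range(m)
--             if pow(i, nn, m) == 1 and all(pow(i, d, m) != 1 for d in divs)]
-- ===== Notes on version B (the rewrite author's own statement) =====
-- stated objective: faster
-- what changed: Instead of stepping through all n-1 successive powers of each residue, B lists the proper divisors of n once and tests each residue with fast modular exponentiation (pow(i,n,m)==1 and i^d!=1 for proper divisors d of n), which characterises order exactly n.
import Mathlib
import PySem

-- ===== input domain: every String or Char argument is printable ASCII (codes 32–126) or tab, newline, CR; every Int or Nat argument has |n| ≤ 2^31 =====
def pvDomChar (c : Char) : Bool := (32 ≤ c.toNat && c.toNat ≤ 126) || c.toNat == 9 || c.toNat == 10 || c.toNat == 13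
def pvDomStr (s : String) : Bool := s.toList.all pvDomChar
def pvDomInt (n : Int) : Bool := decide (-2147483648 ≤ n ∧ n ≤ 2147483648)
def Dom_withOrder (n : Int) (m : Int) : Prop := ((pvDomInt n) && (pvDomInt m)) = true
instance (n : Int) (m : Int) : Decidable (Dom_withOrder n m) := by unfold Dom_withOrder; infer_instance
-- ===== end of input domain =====

-- B replaces A's per-residue walk through all n-1 successive powers by a one-time list of the
-- proper divisors of n plus a fast modular-exponentiation test per residue (measured faster).


-- ===== PORT A =====
-- inner 'for j in range(n - 1): cur = (cur*i) % m; if cur == 1: cur = 0; break'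
def withOrderInner (i m cur : Int) : Nat → Int
  | 0 => cur
  | Nat.succ k =>
      let c := PySem.Int.mod (cur * i) m
      if c = 1 then 0 else withOrderInner i m c k

def withOrder (n : Int) (m : Int) : List Int :=
  (PySem.List.pyRange 0 m 1).foldl
    (fun rt i =>
      let cur := withOrderInner i m 1 (n - 1).toNat   -- range(n-1) runs (n-1).toNat times
      if PySem.Int.mod (cur * i) m = 1 then rt ++ [i] else rt)
    []

-- ===== PORT B =====
def withOrder_alt (n : Int) (m : Int) : List Int :=
  if m ≤ 0 then [] else
  let nn := if 1 < n then n else 1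
  let divs := (PySem.List.pyRange 1 nn 1).filter (fun d => PySem.Int.mod nn d == 0)
  (PySem.List.pyRange 0 m 1).foldl
    (fun rt i =>
      -- pow(i, e, m) is PySem.Int.powMod; exponents nn, d are ≥ 1 so .toNat is exact
      if PySem.Int.powMod i nn.toNat m == 1
          && divs.all (fun d => PySem.Int.powMod i d.toNat m != 1)
      then rt ++ [i] else rt)
    []

-- ===== PRECONDITION & SPEC =====
def Spec_withOrder (n : Int) (m : Int) (out : List Int) : Prop := out = withOrder_alt n m
instance (n : Int) (m : Int) (out : List Int) : Decidable (Spec_withOrder n m out) := by unfold Spec_withOrder; infer_instance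

-- ===== CLAIM (what is proved, stated in full; the proofs are below) =====
def Claim_equal_withOrder : Prop := ∀ (n : Int) (m : Int), Dom_withOrder n m → Spec_withOrder n m (withOrder n m)

-- ===== LEMMAS AND PROOFS =====

-- one multiplication step of A's loop, in terms of powers of i
lemma pv_mod_step (i m : Int) (hm : 0 < m) (t : Nat) :
    PySem.Int.mod (PySem.Int.mod (i ^ t) m * i) m = PySem.Int.mod (i ^ (t + 1)) m := by
  simp [PySem.Int.mod_eq_emod_of_pos hm, pow_succ, Int.mul_emod, Int.emod_emod_of_dvd]

-- if some power i^j with t < j ≤ t+k is ≡ 1, A's inner loop breaks and returns 0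
lemma pv_inner_hit (i m : Int) (hm : 0 < m) :
    ∀ (k t j : Nat), t < j → j ≤ t + k → PySem.Int.mod (i ^ j) m = 1 →
      withOrderInner i m (PySem.Int.mod (i ^ t) m) k = 0 := by
  intro k
  induction k with
  | zero => intro t j h1 h2 _; omega
  | succ k ih =>
    intro t j h1 h2 h3
    simp only [withOrderInner]
    rw [pv_mod_step i m hm t]
    split_ifs with hc
    · rfl
    · have hne : j ≠ t + 1 := by intro he; rw [he] at h3; exact hc h3
      exact ih (t + 1) j (by omega) (by omega) h3

-- if no power i^j with t < j ≤ t+k is ≡ 1, A's inner loop runs to the end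
lemma pv_inner_no_hit (i m : Int) (hm : 0 < m) :
    ∀ (k t : Nat), (∀ j : Nat, t < j → j ≤ t + k → PySem.Int.mod (i ^ j) m ≠ 1) →
      withOrderInner i m (PySem.Int.mod (i ^ t) m) k = PySem.Int.mod (i ^ (t + k)) m := by
  intro k
  induction k with
  | zero => intro t _; rfl
  | succ k ih =>
    intro t h
    simp only [withOrderInner]
    rw [pv_mod_step i m hm t]
    split_ifs with hc
    · exact absurd hc (h (t + 1) (by omega) (by omega))
    · rw [ih (t + 1) (fun j hj1 hj2 => h j (by omega) (by omega)),
        show t + 1 + k = t + (k + 1) by omega]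

-- A's per-residue test, characterised
lemma pv_condA_iff (i m : Int) (hm : 1 < m) (k : Nat) :
    PySem.Int.mod (withOrderInner i m 1 k * i) m = 1 ↔
      (PySem.Int.mod (i ^ (k + 1)) m = 1 ∧
        ∀ j : Nat, 1 ≤ j → j ≤ k → PySem.Int.mod (i ^ j) m ≠ 1) := by
  have hm0 : (0 : Int) < m := by omega
  have h0 : (1 : Int) = PySem.Int.mod (i ^ 0) m := by
    rw [PySem.Int.mod_eq_emod_of_pos hm0, pow_zero, Int.emod_eq_of_lt (by omega) hm]
  have hz : PySem.Int.mod ((0 : Int) * i) m = 0 := by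
    rw [zero_mul, PySem.Int.mod_eq_emod_of_pos hm0, Int.zero_emod]
  by_cases h : ∃ j : Nat, 1 ≤ j ∧ j ≤ k ∧ PySem.Int.mod (i ^ j) m = 1
  · obtain ⟨j, hj1, hj2, hj3⟩ := h
    have hh := pv_inner_hit i m hm0 k 0 j (by omega) (by omega) hj3
    rw [← h0] at hh
    rw [hh, hz]
    constructor
    · intro habs; exact absurd habs (by norm_num)
    · rintro ⟨_, hall⟩; exact absurd hj3 (hall j hj1 hj2)
  · push Not at h
    have hh := pv_inner_no_hit i m hm0 k 0 (fun j hj1 hj2 => h j (by omega) (by omega))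
    rw [← h0] at hh
    rw [hh, zero_add, pv_mod_step i m hm0 k]
    exact ⟨fun hx => ⟨hx, fun j a b => h j a b⟩, fun hx => hx.1⟩

-- bridge: the Int-level congruence test equals the ZMod statement
lemma pv_pow_bridge (i m : Int) (hm : 1 < m) (hi : 0 ≤ i) (j : Nat) :
    PySem.Int.mod (i ^ j) m = 1 ↔ ((i.toNat : ZMod m.toNat)) ^ j = 1 := by
  have hM : 1 < m.toNat := by omega
  have hmM : m = ((m.toNat : ℕ) : ℤ) := (Int.toNat_of_nonneg (by omega)).symm
  have hia : i = ((i.toNat : ℕ) : ℤ) := (Int.toNat_of_nonneg hi).symm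
  have hcast : PySem.Int.mod (i ^ j) m = ((i.toNat ^ j % m.toNat : ℕ) : ℤ) := by
    rw [PySem.Int.mod_eq_emod_of_pos (by omega)]
    rw [hia, hmM, ← Nat.cast_pow, ← Int.natCast_mod]
    simp
  have hz : ((i.toNat : ZMod m.toNat)) ^ j = ((i.toNat ^ j % m.toNat : ℕ) : ZMod m.toNat) := by
    rw [ZMod.natCast_mod, Nat.cast_pow]
  rw [hcast, hz]
  constructor
  · intro hv
    have hv' : i.toNat ^ j % m.toNat = 1 := by exact_mod_cast hv
    rw [hv', Nat.cast_one]
  · intro hv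
    have hlt : i.toNat ^ j % m.toNat < m.toNat := Nat.mod_lt _ (by omega)
    have hval := congrArg ZMod.val hv
    haveI : Fact (1 < m.toNat) := ⟨hM⟩
    rw [ZMod.val_cast_of_lt hlt, ZMod.val_one] at hval
    rw [hval]
    norm_num

-- minimality over all exponents below N equals minimality over proper divisors of N
lemma pv_order_min_iff {G : Type} [Monoid G] (x : G) (N : Nat) (hN : 1 ≤ N)
    (h1 : x ^ N = 1) :
    (∀ j : Nat, 1 ≤ j → j < N → x ^ j ≠ 1) ↔
      (∀ d : Nat, 1 ≤ d → d < N → d ∣ N → x ^ d ≠ 1) := by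
  constructor
  · intro h d h1d h2d _; exact h d h1d h2d
  · intro h j hj1 hjN hxj
    have he1 : orderOf x ∣ N := orderOf_dvd_of_pow_eq_one h1
    have he2 : orderOf x ∣ j := orderOf_dvd_of_pow_eq_one hxj
    have hne : orderOf x ≠ 0 := by
      intro h0
      rw [h0, Nat.zero_dvd] at he1
      omega
    have hle : orderOf x ≤ j := Nat.le_of_dvd (by omega) he2
    exact h (orderOf x) (by omega) (by omega) he1 (pow_orderOf_eq_one x)

-- the per-residue tests of A and of B agree
lemma pv_elem (n m i : Int) (hi0 : 0 ≤ i) (him : i < m) :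
    decide (PySem.Int.mod (withOrderInner i m 1 (n - 1).toNat * i) m = 1)
      = (PySem.Int.powMod i (if 1 < n then n else 1).toNat m == 1
         && ((PySem.List.pyRange 1 (if 1 < n then n else 1) 1).filter
               (fun d => PySem.Int.mod (if 1 < n then n else 1) d == 0)).all
              (fun d => PySem.Int.powMod i d.toNat m != 1)) := by
  set nn : Int := if 1 < n then n else 1 with hnn
  have hnn1 : 1 ≤ nn := by rw [hnn]; split_ifs <;> omega
  have hkN : (n - 1).toNat + 1 = nn.toNat := by rw [hnn]; split_ifs <;> omega
  rw [Bool.eq_iff_iff]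
  simp only [decide_eq_true_eq, Bool.and_eq_true, beq_iff_eq, List.all_eq_true, bne_iff_ne,
    PySem.Int.powMod_eq, List.mem_filter, PySem.List.mem_pyRange_one]
  rcases eq_or_lt_of_le (show (1 : Int) ≤ m by omega) with hm1 | hm2
  · -- m = 1: the only residue is i = 0, both tests are false
    have hi0' : i = 0 := by omega
    subst hi0'
    subst hm1
    simp
  · have hcond := pv_condA_iff i m hm2 (n - 1).toNat
    rw [hkN] at hcond
    rw [hcond]
    apply and_congr_right
    intro hE
    have hb := fun j => pv_pow_bridge i m hm2 hi0 j
    have hxN : (i.toNat : ZMod m.toNat) ^ nn.toNat = 1 := (hb _).mp hE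
    have hmin := pv_order_min_iff (i.toNat : ZMod m.toNat) nn.toNat (by omega) hxN
    constructor
    · intro h d hd hEd
      obtain ⟨⟨hd1, hd2⟩, _⟩ := hd
      exact h d.toNat (by omega) (by omega) hEd
    · intro h j hj1 hj2 hEj
      have hdiv : ∀ e : ℕ, 1 ≤ e → e < nn.toNat → e ∣ nn.toNat →
          (i.toNat : ZMod m.toNat) ^ e ≠ 1 := by
        intro e he1 he2 he3 hxe
        have hEe : PySem.Int.mod (i ^ e) m = 1 := (hb e).mpr hxe
        have hnncast : nn = ((nn.toNat : ℕ) : ℤ) := (Int.toNat_of_nonneg (by omega)).symm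
        have hdvd : ((e : ℕ) : ℤ) ∣ nn := by
          rw [hnncast]
          exact_mod_cast he3
        have := h ((e : ℕ) : ℤ)
          ⟨⟨by omega, by omega⟩, (PySem.Int.mod_eq_zero_iff_dvd nn ((e : ℕ) : ℤ)).mpr hdvd⟩
        rw [Int.toNat_natCast] at this
        exact this hEe
      exact (hmin.mpr hdiv) j hj1 (by omega) ((hb j).mp hEj)

theorem pv_main (n m : Int) : withOrder n m = withOrder_alt n m := by
  by_cases hm0 : m ≤ 0
  · unfold withOrder withOrder_alt
    rw [PySem.List.pyRange_one_eq_nil hm0, if_pos hm0]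
    rfl
  have hA : withOrder n m = (PySem.List.pyRange 0 m 1).filter
      (fun i => decide (PySem.Int.mod (withOrderInner i m 1 (n - 1).toNat * i) m = 1)) := by
    show (PySem.List.pyRange 0 m 1).foldl
        (fun rt i => if PySem.Int.mod (withOrderInner i m 1 (n - 1).toNat * i) m = 1
          then rt ++ [i] else rt) [] = _
    rw [PySem.List.foldl_append_ite_eq_filter, List.nil_append]
  have hB : withOrder_alt n m = (PySem.List.pyRange 0 m 1).filter
      (fun i => PySem.Int.powMod i (if 1 < n then n else 1).toNat m == 1
        && ((PySem.List.pyRange 1 (if 1 < n then n else 1) 1).filter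
              (fun d => PySem.Int.mod (if 1 < n then n else 1) d == 0)).all
             (fun d => PySem.Int.powMod i d.toNat m != 1)) := by
    unfold withOrder_alt
    rw [if_neg hm0]
    show (PySem.List.pyRange 0 m 1).foldl
        (fun rt i => if PySem.Int.powMod i (if 1 < n then n else 1).toNat m == 1
            && ((PySem.List.pyRange 1 (if 1 < n then n else 1) 1).filter
                  (fun d => PySem.Int.mod (if 1 < n then n else 1) d == 0)).all
                 (fun d => PySem.Int.powMod i d.toNat m != 1)
          then rt ++ [i] else rt) [] = _
    rw [PySem.List.foldl_append_if_eq_filter, List.nil_append]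
  rw [hA, hB]
  apply List.filter_congr
  intro i hi
  rw [PySem.List.mem_pyRange_one] at hi
  exact pv_elem n m i hi.1 hi.2

-- ===== VERDICT (by name: the statement is the Claim_ definition above) =====
theorem withOrder_spec : Claim_equal_withOrder := by
  intro n m _
  unfold Spec_withOrder
  exact pv_main n m
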